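-- pv_equiv track=rewrite | github.com/DropTracker-io/droptracker-internal | utils/dynamic_handling.py | get_coin_image_id
-- ===== SOURCE A (Python) =====
-- def get_coin_image_id(quantity):
--     """
--     Returns the coin image id based on the coin quantity.
--
--     Mapping:
--       1    -> 995.png
--       2    -> 996.png
--       3    -> 997.png
--       4    -> 998.png
--       5    -> 999.png
--       10   -> 1000.png
--       50   -> 1001.png
--       100  -> 1002.png
--       1000 -> 1003.png
--       10000-> 1004.png
--
--     For quantities that do not exactly match a key, returns the image corresponding
--     to the highest key that is less than or equal to the quantity.
--     """
--     mapping = {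
--         1: 995,
--         2: 996,
--         3: 997,
--         4: 998,
--         5: 999,
--         10: 1000,
--         50: 1001,
--         100: 1002,
--         1000: 1003,
--         10000: 1004,
--     }
--     # Find all keys less than or equal to the quantity.
--     possible = [k for k in mapping.keys() if quantity >= k]
--     if not possible:
--         return mapping[1]
--     best = max(possible)
--     return mapping[best]
-- ===== SOURCE B (Python) =====
-- def get_coin_image_id(quantity):
--     thresholds = [1, 2, 3, 4, 5, 10, 50, 100, 1000, 10000]
--     ids = [995, 996, 997, 998, 999, 1000, 1001, 1002, 1003, 1004]
--     lo, hi = 0, len(thresholds)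
--     while lo < hi:  # bisect_right by hand
--         mid = (lo + hi) // 2
--         if quantity < thresholds[mid]:
--             hi = mid
--         else:
--             lo = mid + 1
--     return ids[max(0, lo - 1)]
-- ===== Notes on version B (the rewrite author's own statement) =====
-- stated objective: alternative
-- what changed: Replaced the dict + filter-all-keys + max linear scan with two parallel sorted lists and a hand-written bisect_right binary search, clamping the index for quantities below 1.
import Mathlib
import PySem

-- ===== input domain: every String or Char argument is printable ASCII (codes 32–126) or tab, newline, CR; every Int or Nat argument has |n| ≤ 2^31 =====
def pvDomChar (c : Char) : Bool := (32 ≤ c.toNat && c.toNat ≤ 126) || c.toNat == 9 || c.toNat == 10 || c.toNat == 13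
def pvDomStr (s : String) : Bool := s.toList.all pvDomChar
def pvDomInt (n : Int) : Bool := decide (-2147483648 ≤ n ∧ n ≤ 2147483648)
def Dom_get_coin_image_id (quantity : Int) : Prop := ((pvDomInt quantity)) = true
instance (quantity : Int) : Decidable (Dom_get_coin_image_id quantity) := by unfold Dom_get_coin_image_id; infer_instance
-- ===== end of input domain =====

-- B replaces A's filter-all-keys + max scan by a binary search over sorted parallel lists (alternative structure, same result).

-- ===== PORT A =====
def get_coin_image_id (quantity : Int) : Int :=
  let mapping : PySem.Dict Int Int := PySem.Dict.ofList
    [(1, 995), (2, 996), (3, 997), (4, 998), (5, 999),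
     (10, 1000), (50, 1001), (100, 1002), (1000, 1003), (10000, 1004)]
  let possible := (PySem.Dict.keys mapping).filter (fun k => quantity ≥ k)
  if possible = [] then mapping.getD 1 0
  else
    match PySem.List.max? possible (fun x => x) with
    | some best => mapping.getD best 0
    | none => 0   -- unreachable: possible ≠ []

-- ===== PORT B =====
-- hand-written bisect_right loop from Source B, as structural recursion on hi - lo
def bisectLoop (thresholds : List Int) (quantity : Int) (lo hi : Nat) : Nat :=
  if _h : lo < hi then
    let mid := (lo + hi) / 2
    if quantity < thresholds.getD mid 0 then
      bisectLoop thresholds quantity lo mid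
    else
      bisectLoop thresholds quantity (mid + 1) hi
  else lo
termination_by hi - lo
decreasing_by all_goals omega

def get_coin_image_id_alt (quantity : Int) : Int :=
  let thresholds : List Int := [1, 2, 3, 4, 5, 10, 50, 100, 1000, 10000]
  let ids : List Int := [995, 996, 997, 998, 999, 1000, 1001, 1002, 1003, 1004]
  let lo := bisectLoop thresholds quantity 0 thresholds.length
  ids.getD (max 0 (lo - 1)) 0

-- ===== PRECONDITION & SPEC =====
def Spec_get_coin_image_id (quantity : Int) (out : Int) : Prop := out = get_coin_image_id_alt quantity
instance (quantity : Int) (out : Int) : Decidable (Spec_get_coin_image_id quantity out) := by unfold Spec_get_coin_image_id; infer_instance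

-- ===== CLAIM (what is proved, stated in full; the proofs are below) =====
def Claim_equal_get_coin_image_id : Prop := ∀ (quantity : Int), Dom_get_coin_image_id quantity → Spec_get_coin_image_id quantity (get_coin_image_id quantity)

-- ===== LEMMAS AND PROOFS =====

-- B's binary search, evaluated along its decision path on each of the 11 intervals
theorem b_case0 (q : Int) (hU : q < 1) : get_coin_image_id_alt q = 995 := by
  simp only [get_coin_image_id_alt, List.length]
  rw [bisectLoop]; norm_num [show q < 10 from by omega]
  rw [bisectLoop]; norm_num [show q < 3 from by omega]
  rw [bisectLoop]; norm_num [show q < 2 from by omega]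
  rw [bisectLoop]; norm_num [show q < 1 from by omega]
  rw [bisectLoop]
  norm_num

theorem b_case1 (q : Int) (hL : 1 ≤ q) (hU : q < 2) : get_coin_image_id_alt q = 995 := by
  simp only [get_coin_image_id_alt, List.length]
  rw [bisectLoop]; norm_num [show q < 10 from by omega]
  rw [bisectLoop]; norm_num [show q < 3 from by omega]
  rw [bisectLoop]; norm_num [show q < 2 from by omega]
  rw [bisectLoop]; norm_num [show ¬ q < 1 from by omega]
  rw [bisectLoop]
  norm_num

theorem b_case2 (q : Int) (hL : 2 ≤ q) (hU : q < 3) : get_coin_image_id_alt q = 996 := by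
  simp only [get_coin_image_id_alt, List.length]
  rw [bisectLoop]; norm_num [show q < 10 from by omega]
  rw [bisectLoop]; norm_num [show q < 3 from by omega]
  rw [bisectLoop]; norm_num [show ¬ q < 2 from by omega]
  rw [bisectLoop]
  norm_num

theorem b_case3 (q : Int) (hL : 3 ≤ q) (hU : q < 4) : get_coin_image_id_alt q = 997 := by
  simp only [get_coin_image_id_alt, List.length]
  rw [bisectLoop]; norm_num [show q < 10 from by omega]
  rw [bisectLoop]; norm_num [show ¬ q < 3 from by omega]
  rw [bisectLoop]; norm_num [show q < 5 from by omega]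
  rw [bisectLoop]; norm_num [show q < 4 from by omega]
  rw [bisectLoop]
  norm_num

theorem b_case4 (q : Int) (hL : 4 ≤ q) (hU : q < 5) : get_coin_image_id_alt q = 998 := by
  simp only [get_coin_image_id_alt, List.length]
  rw [bisectLoop]; norm_num [show q < 10 from by omega]
  rw [bisectLoop]; norm_num [show ¬ q < 3 from by omega]
  rw [bisectLoop]; norm_num [show q < 5 from by omega]
  rw [bisectLoop]; norm_num [show ¬ q < 4 from by omega]
  rw [bisectLoop]
  norm_num

theorem b_case5 (q : Int) (hL : 5 ≤ q) (hU : q < 10) : get_coin_image_id_alt q = 999 := by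
  simp only [get_coin_image_id_alt, List.length]
  rw [bisectLoop]; norm_num [show q < 10 from by omega]
  rw [bisectLoop]; norm_num [show ¬ q < 3 from by omega]
  rw [bisectLoop]; norm_num [show ¬ q < 5 from by omega]
  rw [bisectLoop]
  norm_num

theorem b_case6 (q : Int) (hL : 10 ≤ q) (hU : q < 50) : get_coin_image_id_alt q = 1000 := by
  simp only [get_coin_image_id_alt, List.length]
  rw [bisectLoop]; norm_num [show ¬ q < 10 from by omega]
  rw [bisectLoop]; norm_num [show q < 1000 from by omega]
  rw [bisectLoop]; norm_num [show q < 100 from by omega]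
  rw [bisectLoop]; norm_num [show q < 50 from by omega]
  rw [bisectLoop]
  norm_num

theorem b_case7 (q : Int) (hL : 50 ≤ q) (hU : q < 100) : get_coin_image_id_alt q = 1001 := by
  simp only [get_coin_image_id_alt, List.length]
  rw [bisectLoop]; norm_num [show ¬ q < 10 from by omega]
  rw [bisectLoop]; norm_num [show q < 1000 from by omega]
  rw [bisectLoop]; norm_num [show q < 100 from by omega]
  rw [bisectLoop]; norm_num [show ¬ q < 50 from by omega]
  rw [bisectLoop]
  norm_num

theorem b_case8 (q : Int) (hL : 100 ≤ q) (hU : q < 1000) : get_coin_image_id_alt q = 1002 := by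
  simp only [get_coin_image_id_alt, List.length]
  rw [bisectLoop]; norm_num [show ¬ q < 10 from by omega]
  rw [bisectLoop]; norm_num [show q < 1000 from by omega]
  rw [bisectLoop]; norm_num [show ¬ q < 100 from by omega]
  rw [bisectLoop]
  norm_num

theorem b_case9 (q : Int) (hL : 1000 ≤ q) (hU : q < 10000) : get_coin_image_id_alt q = 1003 := by
  simp only [get_coin_image_id_alt, List.length]
  rw [bisectLoop]; norm_num [show ¬ q < 10 from by omega]
  rw [bisectLoop]; norm_num [show ¬ q < 1000 from by omega]
  rw [bisectLoop]; norm_num [show q < 10000 from by omega]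
  rw [bisectLoop]
  norm_num

theorem b_case10 (q : Int) (hL : 10000 ≤ q) : get_coin_image_id_alt q = 1004 := by
  simp only [get_coin_image_id_alt, List.length]
  rw [bisectLoop]; norm_num [show ¬ q < 10 from by omega]
  rw [bisectLoop]; norm_num [show ¬ q < 1000 from by omega]
  rw [bisectLoop]; norm_num [show ¬ q < 10000 from by omega]
  rw [bisectLoop]
  norm_num

-- A's filter + max scan, evaluated with all ten comparisons decided per interval
theorem a_case0 (q : Int) (hU : q < 1) : get_coin_image_id q = 995 := by
  simp [get_coin_image_id, PySem.Dict.ofList, PySem.Dict.keys, PySem.List.max?,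
    PySem.Dict.getD, PySem.Dict.get?, List.filter, PySem.Dict.update, PySem.Dict.insert,
    PySem.Dict.empty, PySem.Dict.contains, List.find?,
    show ¬(1:Int) ≤ q from by omega, show ¬(2:Int) ≤ q from by omega, show ¬(3:Int) ≤ q from by omega, show ¬(4:Int) ≤ q from by omega, show ¬(5:Int) ≤ q from by omega, show ¬(10:Int) ≤ q from by omega, show ¬(50:Int) ≤ q from by omega, show ¬(100:Int) ≤ q from by omega, show ¬(1000:Int) ≤ q from by omega, show ¬(10000:Int) ≤ q from by omega]

theorem a_case1 (q : Int) (hL : 1 ≤ q) (hU : q < 2) : get_coin_image_id q = 995 := by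
  simp [get_coin_image_id, PySem.Dict.ofList, PySem.Dict.keys, PySem.List.max?,
    PySem.Dict.getD, PySem.Dict.get?, List.filter, PySem.Dict.update, PySem.Dict.insert,
    PySem.Dict.empty, PySem.Dict.contains, List.find?,
    show (1:Int) ≤ q from by omega, show ¬(2:Int) ≤ q from by omega, show ¬(3:Int) ≤ q from by omega, show ¬(4:Int) ≤ q from by omega, show ¬(5:Int) ≤ q from by omega, show ¬(10:Int) ≤ q from by omega, show ¬(50:Int) ≤ q from by omega, show ¬(100:Int) ≤ q from by omega, show ¬(1000:Int) ≤ q from by omega, show ¬(10000:Int) ≤ q from by omega]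

theorem a_case2 (q : Int) (hL : 2 ≤ q) (hU : q < 3) : get_coin_image_id q = 996 := by
  simp [get_coin_image_id, PySem.Dict.ofList, PySem.Dict.keys, PySem.List.max?,
    PySem.Dict.getD, PySem.Dict.get?, List.filter, PySem.Dict.update, PySem.Dict.insert,
    PySem.Dict.empty, PySem.Dict.contains, List.find?,
    show (1:Int) ≤ q from by omega, show (2:Int) ≤ q from by omega, show ¬(3:Int) ≤ q from by omega, show ¬(4:Int) ≤ q from by omega, show ¬(5:Int) ≤ q from by omega, show ¬(10:Int) ≤ q from by omega, show ¬(50:Int) ≤ q from by omega, show ¬(100:Int) ≤ q from by omega, show ¬(1000:Int) ≤ q from by omega, show ¬(10000:Int) ≤ q from by omega]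

theorem a_case3 (q : Int) (hL : 3 ≤ q) (hU : q < 4) : get_coin_image_id q = 997 := by
  simp [get_coin_image_id, PySem.Dict.ofList, PySem.Dict.keys, PySem.List.max?,
    PySem.Dict.getD, PySem.Dict.get?, List.filter, PySem.Dict.update, PySem.Dict.insert,
    PySem.Dict.empty, PySem.Dict.contains, List.find?,
    show (1:Int) ≤ q from by omega, show (2:Int) ≤ q from by omega, show (3:Int) ≤ q from by omega, show ¬(4:Int) ≤ q from by omega, show ¬(5:Int) ≤ q from by omega, show ¬(10:Int) ≤ q from by omega, show ¬(50:Int) ≤ q from by omega, show ¬(100:Int) ≤ q from by omega, show ¬(1000:Int) ≤ q from by omega, show ¬(10000:Int) ≤ q from by omega]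

theorem a_case4 (q : Int) (hL : 4 ≤ q) (hU : q < 5) : get_coin_image_id q = 998 := by
  simp [get_coin_image_id, PySem.Dict.ofList, PySem.Dict.keys, PySem.List.max?,
    PySem.Dict.getD, PySem.Dict.get?, List.filter, PySem.Dict.update, PySem.Dict.insert,
    PySem.Dict.empty, PySem.Dict.contains, List.find?,
    show (1:Int) ≤ q from by omega, show (2:Int) ≤ q from by omega, show (3:Int) ≤ q from by omega, show (4:Int) ≤ q from by omega, show ¬(5:Int) ≤ q from by omega, show ¬(10:Int) ≤ q from by omega, show ¬(50:Int) ≤ q from by omega, show ¬(100:Int) ≤ q from by omega, show ¬(1000:Int) ≤ q from by omega, show ¬(10000:Int) ≤ q from by omega]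

theorem a_case5 (q : Int) (hL : 5 ≤ q) (hU : q < 10) : get_coin_image_id q = 999 := by
  simp [get_coin_image_id, PySem.Dict.ofList, PySem.Dict.keys, PySem.List.max?,
    PySem.Dict.getD, PySem.Dict.get?, List.filter, PySem.Dict.update, PySem.Dict.insert,
    PySem.Dict.empty, PySem.Dict.contains, List.find?,
    show (1:Int) ≤ q from by omega, show (2:Int) ≤ q from by omega, show (3:Int) ≤ q from by omega, show (4:Int) ≤ q from by omega, show (5:Int) ≤ q from by omega, show ¬(10:Int) ≤ q from by omega, show ¬(50:Int) ≤ q from by omega, show ¬(100:Int) ≤ q from by omega, show ¬(1000:Int) ≤ q from by omega, show ¬(10000:Int) ≤ q from by omega]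

theorem a_case6 (q : Int) (hL : 10 ≤ q) (hU : q < 50) : get_coin_image_id q = 1000 := by
  simp [get_coin_image_id, PySem.Dict.ofList, PySem.Dict.keys, PySem.List.max?,
    PySem.Dict.getD, PySem.Dict.get?, List.filter, PySem.Dict.update, PySem.Dict.insert,
    PySem.Dict.empty, PySem.Dict.contains, List.find?,
    show (1:Int) ≤ q from by omega, show (2:Int) ≤ q from by omega, show (3:Int) ≤ q from by omega, show (4:Int) ≤ q from by omega, show (5:Int) ≤ q from by omega, show (10:Int) ≤ q from by omega, show ¬(50:Int) ≤ q from by omega, show ¬(100:Int) ≤ q from by omega, show ¬(1000:Int) ≤ q from by omega, show ¬(10000:Int) ≤ q from by omega]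

theorem a_case7 (q : Int) (hL : 50 ≤ q) (hU : q < 100) : get_coin_image_id q = 1001 := by
  simp [get_coin_image_id, PySem.Dict.ofList, PySem.Dict.keys, PySem.List.max?,
    PySem.Dict.getD, PySem.Dict.get?, List.filter, PySem.Dict.update, PySem.Dict.insert,
    PySem.Dict.empty, PySem.Dict.contains, List.find?,
    show (1:Int) ≤ q from by omega, show (2:Int) ≤ q from by omega, show (3:Int) ≤ q from by omega, show (4:Int) ≤ q from by omega, show (5:Int) ≤ q from by omega, show (10:Int) ≤ q from by omega, show (50:Int) ≤ q from by omega, show ¬(100:Int) ≤ q from by omega, show ¬(1000:Int) ≤ q from by omega, show ¬(10000:Int) ≤ q from by omega]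

theorem a_case8 (q : Int) (hL : 100 ≤ q) (hU : q < 1000) : get_coin_image_id q = 1002 := by
  simp [get_coin_image_id, PySem.Dict.ofList, PySem.Dict.keys, PySem.List.max?,
    PySem.Dict.getD, PySem.Dict.get?, List.filter, PySem.Dict.update, PySem.Dict.insert,
    PySem.Dict.empty, PySem.Dict.contains, List.find?,
    show (1:Int) ≤ q from by omega, show (2:Int) ≤ q from by omega, show (3:Int) ≤ q from by omega, show (4:Int) ≤ q from by omega, show (5:Int) ≤ q from by omega, show (10:Int) ≤ q from by omega, show (50:Int) ≤ q from by omega, show (100:Int) ≤ q from by omega, show ¬(1000:Int) ≤ q from by omega, show ¬(10000:Int) ≤ q from by omega]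

theorem a_case9 (q : Int) (hL : 1000 ≤ q) (hU : q < 10000) : get_coin_image_id q = 1003 := by
  simp [get_coin_image_id, PySem.Dict.ofList, PySem.Dict.keys, PySem.List.max?,
    PySem.Dict.getD, PySem.Dict.get?, List.filter, PySem.Dict.update, PySem.Dict.insert,
    PySem.Dict.empty, PySem.Dict.contains, List.find?,
    show (1:Int) ≤ q from by omega, show (2:Int) ≤ q from by omega, show (3:Int) ≤ q from by omega, show (4:Int) ≤ q from by omega, show (5:Int) ≤ q from by omega, show (10:Int) ≤ q from by omega, show (50:Int) ≤ q from by omega, show (100:Int) ≤ q from by omega, show (1000:Int) ≤ q from by omega, show ¬(10000:Int) ≤ q from by omega]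

theorem a_case10 (q : Int) (hL : 10000 ≤ q) : get_coin_image_id q = 1004 := by
  simp [get_coin_image_id, PySem.Dict.ofList, PySem.Dict.keys, PySem.List.max?,
    PySem.Dict.getD, PySem.Dict.get?, List.filter, PySem.Dict.update, PySem.Dict.insert,
    PySem.Dict.empty, PySem.Dict.contains, List.find?,
    show (1:Int) ≤ q from by omega, show (2:Int) ≤ q from by omega, show (3:Int) ≤ q from by omega, show (4:Int) ≤ q from by omega, show (5:Int) ≤ q from by omega, show (10:Int) ≤ q from by omega, show (50:Int) ≤ q from by omega, show (100:Int) ≤ q from by omega, show (1000:Int) ≤ q from by omega, show (10000:Int) ≤ q from by omega]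

-- ===== VERDICT (by name: the statement is the Claim_ definition above) =====
theorem get_coin_image_id_spec : Claim_equal_get_coin_image_id := by
  intro q _
  unfold Spec_get_coin_image_id
  by_cases h10 : 10000 ≤ q
  · rw [a_case10 q h10, b_case10 q h10]
  by_cases h9 : 1000 ≤ q
  · rw [a_case9 q h9 (by omega), b_case9 q h9 (by omega)]
  by_cases h8 : 100 ≤ q
  · rw [a_case8 q h8 (by omega), b_case8 q h8 (by omega)]
  by_cases h7 : 50 ≤ q
  · rw [a_case7 q h7 (by omega), b_case7 q h7 (by omega)]
  by_cases h6 : 10 ≤ q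
  · rw [a_case6 q h6 (by omega), b_case6 q h6 (by omega)]
  by_cases h5 : 5 ≤ q
  · rw [a_case5 q h5 (by omega), b_case5 q h5 (by omega)]
  by_cases h4 : 4 ≤ q
  · rw [a_case4 q h4 (by omega), b_case4 q h4 (by omega)]
  by_cases h3 : 3 ≤ q
  · rw [a_case3 q h3 (by omega), b_case3 q h3 (by omega)]
  by_cases h2 : 2 ≤ q
  · rw [a_case2 q h2 (by omega), b_case2 q h2 (by omega)]
  by_cases h1 : 1 ≤ q
  · rw [a_case1 q h1 (by omega), b_case1 q h1 (by omega)]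
  · rw [a_case0 q (by omega), b_case0 q (by omega)]
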